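-- pv_equiv track=rewrite | github.com/md-labs/Clinical_Hedges_BERT | src/Data_Extraction_And_PreProcessing/Create_CrossValidation_Data_All_Models.py | filterLabelsTask4
-- ===== SOURCE A (Python) =====
-- def filterLabelsTask2(task1, task2):
--     filter1_labels = ['NA',]
--     result = []
--     task1Dict = dict()
--     for row in task1:
--         if(row[2] in filter1_labels):
--             task1Dict[row[0]] = 1
--     for row in task2:
--         if(row[0] not in task1Dict):
--             result.append(row)
--     return result
--
-- def filterLabelsTask3(task1, task2, task3):
--     task3 = filterLabelsTask2(task1, task3)
--     filter2_labels = ['F']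
--     result = []
--     task2Dict = dict()
--     for row in task2:
--         if(row[2] in filter2_labels):
--             task2Dict[row[0]] = 1
--     for row in task3:
--         if(row[0] not in task2Dict):
--             result.append(row)
--     return result
--
-- def filterLabelsTask4(task1, task2, task3, task4):
--     task4 = filterLabelsTask3(task1, task2, task4)
--     filter3_labels = ['NA']
--     result = []
--     task3Dict = dict()
--     task1Dict = dict()
--     for row in task1:
--         if(row[2] == 'O'):
--             task1Dict[row[0]] = 1
--     for row in task3:
--         if(row[2] in filter3_labels or (row[2] == 'C' and row[0] in task1Dict)):
--             task3Dict[row[0]] = 1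
--     for row in task4:
--         if(row[0] not in task3Dict):
--             result.append(row)
--     return result
-- ===== SOURCE B (Python) =====
-- def filterLabelsTask4(task1, task2, task3, task4):
--     o_ids = {row[0] for row in task1 if row[2] == 'O'}
--     e1 = {row[0] for row in task1 if row[2] == 'NA'}
--     e2 = {row[0] for row in task2 if row[2] == 'F'}
--     e3 = {row[0] for row in task3
--           if row[2] == 'NA' or (row[2] == 'C' and row[0] in o_ids)}
--     return [row for row in task4
--             if row[0] not in e1 and row[0] not in e2 and row[0] not in e3]
-- ===== Notes on version B (the rewrite author's own statement) =====
-- stated objective: simpler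
-- what changed: Replaces the three cascaded helper calls, each building a dict and rebuilding an intermediate filtered list of task4 rows, by three exclusion sets computed up front and one single filtering pass over task4.
import Mathlib
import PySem

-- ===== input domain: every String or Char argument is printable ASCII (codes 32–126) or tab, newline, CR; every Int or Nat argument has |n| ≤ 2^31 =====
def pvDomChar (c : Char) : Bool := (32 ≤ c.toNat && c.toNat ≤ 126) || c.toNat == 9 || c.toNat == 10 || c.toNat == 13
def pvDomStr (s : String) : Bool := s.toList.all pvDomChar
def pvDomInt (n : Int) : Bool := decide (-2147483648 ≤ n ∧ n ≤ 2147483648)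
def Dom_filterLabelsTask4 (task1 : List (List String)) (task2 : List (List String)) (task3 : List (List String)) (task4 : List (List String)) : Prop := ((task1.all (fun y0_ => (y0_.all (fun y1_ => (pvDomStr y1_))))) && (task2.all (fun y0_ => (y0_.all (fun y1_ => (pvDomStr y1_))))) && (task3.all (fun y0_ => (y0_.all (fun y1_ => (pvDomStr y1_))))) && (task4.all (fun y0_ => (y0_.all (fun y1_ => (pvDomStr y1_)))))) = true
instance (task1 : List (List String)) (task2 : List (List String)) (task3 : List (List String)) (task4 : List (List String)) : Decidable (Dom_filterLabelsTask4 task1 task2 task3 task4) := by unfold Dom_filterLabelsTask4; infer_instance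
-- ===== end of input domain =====

-- B replaces A's three cascaded helper passes (each building a dict and copying task4)
-- by three exclusion sets computed up front and one single filtering pass over task4 (objective: simpler).

-- row[i] on a row guaranteed long enough by Pre_ (exact there; "" default is never read inside Pre_)
def pvGet (r : List String) (i : Int) : String := (PySem.List.pyGet? r i).getD ""

-- ===== PORT A =====
def filterLabelsTask2Port (task1 : List (List String)) (task2 : List (List String)) : List (List String) :=
  let filter1_labels : List String := ["NA"]
  let task1Dict : PySem.Dict String Int :=
    task1.foldl (fun d row => if filter1_labels.contains (pvGet row 2) then d.insert (pvGet row 0) 1 else d) PySem.Dict.empty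
  task2.foldl (fun result row => if !(task1Dict.contains (pvGet row 0)) then result ++ [row] else result) []

def filterLabelsTask3Port (task1 : List (List String)) (task2 : List (List String)) (task3 : List (List String)) : List (List String) :=
  let task3' := filterLabelsTask2Port task1 task3
  let filter2_labels : List String := ["F"]
  let task2Dict : PySem.Dict String Int :=
    task2.foldl (fun d row => if filter2_labels.contains (pvGet row 2) then d.insert (pvGet row 0) 1 else d) PySem.Dict.empty
  task3'.foldl (fun result row => if !(task2Dict.contains (pvGet row 0)) then result ++ [row] else result) []

def filterLabelsTask4 (task1 : List (List String)) (task2 : List (List String)) (task3 : List (List String)) (task4 : List (List String)) : List (List String) :=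
  let task4' := filterLabelsTask3Port task1 task2 task4
  let filter3_labels : List String := ["NA"]
  let task1Dict : PySem.Dict String Int :=
    task1.foldl (fun d row => if pvGet row 2 == "O" then d.insert (pvGet row 0) 1 else d) PySem.Dict.empty
  let task3Dict : PySem.Dict String Int :=
    task3.foldl (fun d row => if filter3_labels.contains (pvGet row 2) || (pvGet row 2 == "C" && task1Dict.contains (pvGet row 0)) then d.insert (pvGet row 0) 1 else d) PySem.Dict.empty
  task4'.foldl (fun result row => if !(task3Dict.contains (pvGet row 0)) then result ++ [row] else result) []

-- ===== PORT B =====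
def filterLabelsTask4_alt (task1 : List (List String)) (task2 : List (List String)) (task3 : List (List String)) (task4 : List (List String)) : List (List String) :=
  let oIds : PySem.Set String := PySem.Set.ofList ((task1.filter (fun r => pvGet r 2 == "O")).map (fun r => pvGet r 0))
  let e1 : PySem.Set String := PySem.Set.ofList ((task1.filter (fun r => pvGet r 2 == "NA")).map (fun r => pvGet r 0))
  let e2 : PySem.Set String := PySem.Set.ofList ((task2.filter (fun r => pvGet r 2 == "F")).map (fun r => pvGet r 0))
  let e3 : PySem.Set String := PySem.Set.ofList ((task3.filter (fun r => pvGet r 2 == "NA" || (pvGet r 2 == "C" && oIds.contains (pvGet r 0)))).map (fun r => pvGet r 0))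
  task4.filter (fun r => !e1.contains (pvGet r 0) && !e2.contains (pvGet r 0) && !e3.contains (pvGet r 0))

-- ===== PRECONDITION & SPEC =====
-- Pre_ excludes exactly the inputs on which Python A raises IndexError: a row of task1/task2/task3
-- shorter than 3 (row[2] is read unconditionally) or an empty row in task4 (row[0] is read).
def Pre_filterLabelsTask4 (task1 : List (List String)) (task2 : List (List String)) (task3 : List (List String)) (task4 : List (List String)) : Prop :=
  (∀ r ∈ task1, 3 ≤ r.length) ∧ (∀ r ∈ task2, 3 ≤ r.length) ∧ (∀ r ∈ task3, 3 ≤ r.length) ∧ (∀ r ∈ task4, 1 ≤ r.length)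
instance (task1 : List (List String)) (task2 : List (List String)) (task3 : List (List String)) (task4 : List (List String)) : Decidable (Pre_filterLabelsTask4 task1 task2 task3 task4) := by unfold Pre_filterLabelsTask4; infer_instance

def pvWitness_filterLabelsTask4 : List (List String) × List (List String) × List (List String) × List (List String) :=
  ([["1", "t", "O"], ["2", "t", "NA"]], [["3", "t", "F"]], [["1", "t", "C"], ["4", "t", "NA"]], [["1"], ["3"], ["5"]])

def Spec_filterLabelsTask4 (task1 : List (List String)) (task2 : List (List String)) (task3 : List (List String)) (task4 : List (List String)) (out : List (List String)) : Prop := out = filterLabelsTask4_alt task1 task2 task3 task4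
instance (task1 : List (List String)) (task2 : List (List String)) (task3 : List (List String)) (task4 : List (List String)) (out : List (List String)) : Decidable (Spec_filterLabelsTask4 task1 task2 task3 task4 out) := by unfold Spec_filterLabelsTask4; infer_instance

-- ===== CLAIM (what is proved, stated in full; the proofs are below) =====
def Claim_equal_filterLabelsTask4 : Prop := ∀ (task1 : List (List String)) (task2 : List (List String)) (task3 : List (List String)) (task4 : List (List String)), Dom_filterLabelsTask4 task1 task2 task3 task4 → Pre_filterLabelsTask4 task1 task2 task3 task4 → Spec_filterLabelsTask4 task1 task2 task3 task4 (filterLabelsTask4 task1 task2 task3 task4)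

-- ===== LEMMAS AND PROOFS =====

-- membership in a dict built by A's "insert key 1 when p row" loop = membership in B's key list
theorem pv_dict_contains (p : List String → Bool) (l : List (List String)) (d : PySem.Dict String Int) (k : String) :
    ((l.foldl (fun d row => if p row then d.insert (pvGet row 0) 1 else d) d).contains k = true)
      ↔ (d.contains k = true ∨ k ∈ (l.filter p).map (fun r => pvGet r 0)) := by
  induction l generalizing d with
  | nil => simp
  | cons h t ih =>
    simp only [List.foldl_cons]
    cases hp : p h with
    | false => simp [hp, ih]
    | true =>
      simp [ih, PySem.Dict.contains_insert, List.filter_cons_of_pos hp]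
      tauto

-- membership in a python set comprehension {row[0] for row in l if p row}
theorem pv_set_contains (p : List String → Bool) (l : List (List String)) (k : String) :
    ((PySem.Set.ofList ((l.filter p).map (fun r => pvGet r 0))).contains k = true)
      ↔ k ∈ (l.filter p).map (fun r => pvGet r 0) := by
  simp [PySem.Set.contains, PySem.Set.mem_ofList]

theorem pv_stage (d : PySem.Dict String Int) (l : List (List String)) :
    (l.foldl (fun result row => if !(d.contains (pvGet row 0)) then result ++ [row] else result) ([] : List (List String)))
      = l.filter (fun row => !(d.contains (pvGet row 0))) := by
  simpa using PySem.List.foldl_append_if (fun row => !(d.contains (pvGet row 0))) id l []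

-- ===== VERDICT (by name: the statement is the Claim_ definition above) =====
theorem filterLabelsTask4_spec : Claim_equal_filterLabelsTask4 := by
  intro task1 task2 task3 task4 _ _
  unfold Spec_filterLabelsTask4 filterLabelsTask4 filterLabelsTask3Port filterLabelsTask2Port filterLabelsTask4_alt
  simp only [pv_stage, List.filter_filter]
  apply List.filter_congr
  intro r _
  have h1 := pv_dict_contains (fun row => (["NA"] : List String).contains (pvGet row 2)) task1 PySem.Dict.empty (pvGet r 0)
  have h2 := pv_dict_contains (fun row => (["F"] : List String).contains (pvGet row 2)) task2 PySem.Dict.empty (pvGet r 0)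
  have hO : ∀ k, ((task1.foldl (fun d row => if pvGet row 2 == "O" then d.insert (pvGet row 0) 1 else d) (PySem.Dict.empty : PySem.Dict String Int)).contains k = true)
      ↔ ((PySem.Set.ofList ((task1.filter (fun r => pvGet r 2 == "O")).map (fun r => pvGet r 0))).contains k = true) := by
    intro k
    have hd := pv_dict_contains (fun row => pvGet row 2 == "O") task1 PySem.Dict.empty k
    have hsz := pv_set_contains (fun row => pvGet row 2 == "O") task1 k
    simp only [PySem.Dict.contains_empty, Bool.false_eq_true, false_or] at hd
    exact hd.trans hsz.symm
  have h3 := pv_dict_contains (fun row => (["NA"] : List String).contains (pvGet row 2)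
      || (pvGet row 2 == "C" && (task1.foldl (fun d row => if pvGet row 2 == "O" then d.insert (pvGet row 0) 1 else d) (PySem.Dict.empty : PySem.Dict String Int)).contains (pvGet row 0)))
      task3 PySem.Dict.empty (pvGet r 0)
  have hfilter3 : task3.filter (fun row => (["NA"] : List String).contains (pvGet row 2)
      || (pvGet row 2 == "C" && (task1.foldl (fun d row => if pvGet row 2 == "O" then d.insert (pvGet row 0) 1 else d) (PySem.Dict.empty : PySem.Dict String Int)).contains (pvGet row 0)))
      = task3.filter (fun row => pvGet row 2 == "NA"
      || (pvGet row 2 == "C" && (PySem.Set.ofList ((task1.filter (fun r => pvGet r 2 == "O")).map (fun r => pvGet r 0))).contains (pvGet row 0))) := by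
    apply List.filter_congr
    intro row _
    rw [Bool.eq_iff_iff.mpr (hO (pvGet row 0))]
    rw [Bool.eq_iff_iff]
    simp
  rw [hfilter3] at h3
  have hf1 : task1.filter (fun row => (["NA"] : List String).contains (pvGet row 2)) = task1.filter (fun row => pvGet row 2 == "NA") :=
    List.filter_congr (fun x _ => by rw [Bool.eq_iff_iff]; simp)
  have hf2 : task2.filter (fun row => (["F"] : List String).contains (pvGet row 2)) = task2.filter (fun row => pvGet row 2 == "F") :=
    List.filter_congr (fun x _ => by rw [Bool.eq_iff_iff]; simp)
  rw [hf1] at h1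
  rw [hf2] at h2
  have s1 := pv_set_contains (fun row => pvGet row 2 == "NA") task1 (pvGet r 0)
  have s2 := pv_set_contains (fun row => pvGet row 2 == "F") task2 (pvGet r 0)
  have s3 := pv_set_contains (fun row => pvGet row 2 == "NA"
      || (pvGet row 2 == "C" && (PySem.Set.ofList ((task1.filter (fun r => pvGet r 2 == "O")).map (fun r => pvGet r 0))).contains (pvGet row 0))) task3 (pvGet r 0)
  simp only [PySem.Dict.contains_empty, Bool.false_eq_true, false_or] at h1 h2 h3
  have e1 := Bool.eq_iff_iff.mpr (h1.trans s1.symm)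
  have e2 := Bool.eq_iff_iff.mpr (h2.trans s2.symm)
  have e3 := Bool.eq_iff_iff.mpr (h3.trans s3.symm)
  rw [e1, e2, e3]
  cases (PySem.Set.ofList ((task1.filter (fun r => pvGet r 2 == "NA")).map (fun r => pvGet r 0))).contains (pvGet r 0) <;>
  cases (PySem.Set.ofList ((task2.filter (fun r => pvGet r 2 == "F")).map (fun r => pvGet r 0))).contains (pvGet r 0) <;>
  cases (PySem.Set.ofList ((task3.filter (fun row => pvGet row 2 == "NA" || (pvGet row 2 == "C" && (PySem.Set.ofList ((task1.filter (fun r => pvGet r 2 == "O")).map (fun r => pvGet r 0))).contains (pvGet row 0)))).map (fun r => pvGet r 0))).contains (pvGet r 0) <;>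
    simp
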